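-- pv_equiv track=rewrite | github.com/maartenpt/flexipipe | flexipipe/parser.py | _learn_attachment_preferences
-- ===== SOURCE A (Python) =====
-- from typing import List, Dict, Optional, Tuple
--
-- def _learn_attachment_preferences(sentence: List[Dict], vocab: Dict, tag_key: str) -> Dict:
--     """
--     Learn attachment preferences from the sentence structure and vocabulary.
--
--     This analyzes the sentence to determine language-specific patterns,
--     such as whether adjectives typically precede or follow nouns.
--
--     Args:
--         sentence: List of tokens
--         vocab: Vocabulary dictionary
--         tag_key: 'upos' or 'xpos'
--
--     Returns:
--         Dictionary with learned preferences, e.g.: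
--         {'adj_noun_order': 'after', 'det_noun_order': 'after', ...}
--     """
--     preferences = {}
--
--     # Analyze ADJ-NOUN patterns in the sentence
--     adj_noun_before = 0
--     adj_noun_after = 0
--
--     for i in range(len(sentence) - 1):
--         pos1 = sentence[i].get(tag_key, '_')
--         if pos1 == '_':
--             pos1 = sentence[i].get('upos' if tag_key == 'xpos' else 'xpos', '_')
--         pos2 = sentence[i + 1].get(tag_key, '_')
--         if pos2 == '_':
--             pos2 = sentence[i + 1].get('upos' if tag_key == 'xpos' else 'xpos', '_')
--
--         # Check ADJ-NOUN patterns
--         is_adj1 = pos1.startswith('A') or (tag_key == 'upos' and pos1 == 'ADJ')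
--         is_noun2 = pos2.startswith('N') or (tag_key == 'upos' and pos2 in ('NOUN', 'PROPN'))
--         is_noun1 = pos1.startswith('N') or (tag_key == 'upos' and pos1 in ('NOUN', 'PROPN'))
--         is_adj2 = pos2.startswith('A') or (tag_key == 'upos' and pos2 == 'ADJ')
--
--         if is_adj1 and is_noun2:
--             adj_noun_before += 1
--         if is_noun1 and is_adj2:
--             adj_noun_after += 1
--
--     # Determine preference (default to 'after' for Romance languages)
--     if adj_noun_after > adj_noun_before:
--         preferences['adj_noun_order'] = 'after'
--     elif adj_noun_before > adj_noun_after: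
--         preferences['adj_noun_order'] = 'before'
--     else:
--         preferences['adj_noun_order'] = 'either'  # No clear preference
--
--     return preferences
-- ===== SOURCE B (Python) =====
-- def _learn_attachment_preferences(sentence, vocab, tag_key):
--     # Encode each token as one category character, then count adjacent patterns
--     # as substring occurrences of 'AN' / 'NA' (categories are mutually exclusive,
--     # so occurrences cannot overlap and str.count is exact).
--     fallback = 'upos' if tag_key == 'xpos' else 'xpos'
--
--     def cat(tok):
--         pos = tok.get(tag_key, '_')
--         if pos == '_':
--             pos = tok.get(fallback, '_')
--         if pos.startswith('A') or (tag_key == 'upos' and pos == 'ADJ'):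
--             return 'A'
--         if pos.startswith('N') or (tag_key == 'upos' and pos in ('NOUN', 'PROPN')):
--             return 'N'
--         return 'O'
--
--     cats = ''.join(cat(tok) for tok in sentence)
--     before = cats.count('AN')
--     after = cats.count('NA')
--     if after > before:
--         order = 'after'
--     elif before > after:
--         order = 'before'
--     else:
--         order = 'either'
--     return {'adj_noun_order': order}
-- ===== Notes on version B (the rewrite author's own statement) =====
-- stated objective: alternative
-- what changed: B classifies every token into a single category character ('A'/'N'/'O'), joins them into one category string, and obtains the two pattern counts as str.count of the substrings 'AN' and 'NA' (exact because the categories are mutually exclusive so occurrences cannot overlap), replacing A's index loop that re-extracts and tests both tags at every adjacent position.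
import Mathlib
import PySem

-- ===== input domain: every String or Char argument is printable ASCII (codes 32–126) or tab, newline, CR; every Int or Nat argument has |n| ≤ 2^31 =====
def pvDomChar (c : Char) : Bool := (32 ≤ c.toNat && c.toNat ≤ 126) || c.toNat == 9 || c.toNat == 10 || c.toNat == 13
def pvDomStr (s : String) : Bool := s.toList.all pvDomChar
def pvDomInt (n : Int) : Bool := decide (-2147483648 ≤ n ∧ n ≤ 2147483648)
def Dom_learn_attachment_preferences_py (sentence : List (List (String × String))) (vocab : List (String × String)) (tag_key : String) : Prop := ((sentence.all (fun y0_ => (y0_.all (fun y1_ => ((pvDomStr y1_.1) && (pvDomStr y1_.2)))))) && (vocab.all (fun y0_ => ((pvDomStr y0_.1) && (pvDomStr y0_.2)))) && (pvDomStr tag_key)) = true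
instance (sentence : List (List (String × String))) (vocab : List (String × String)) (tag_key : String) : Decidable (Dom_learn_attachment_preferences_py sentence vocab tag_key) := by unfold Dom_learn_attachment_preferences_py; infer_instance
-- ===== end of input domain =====

-- B replaces A's index loop over adjacent token pairs by encoding the sentence as one
-- category string ('A'/'N'/'O' per token) and counting the substrings "AN" and "NA";
-- vocab is accepted but unused, exactly as in the Python sources.

-- shared primitive: tok.get(key, default) on an association-list dict (first match)
def pvGet (tok : List (String × String)) (k dflt : String) : String :=
  PySem.Dict.getD (PySem.Dict.mk tok) k dflt

-- ===== PORT A =====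
def learn_attachment_preferences_py (sentence : List (List (String × String))) (vocab : List (String × String)) (tag_key : String) : List (String × String) :=
  let preferences : PySem.Dict String String := PySem.Dict.empty
  -- for i in range(len(sentence) - 1): all indices are in range, so getD is exact here
  let counts := (List.range (sentence.length - 1)).foldl (fun (c : Int × Int) i =>
    let tok1 := sentence.getD i []
    let tok2 := sentence.getD (i + 1) []
    let pos1 :=
      let p := pvGet tok1 tag_key "_"
      if p == "_" then pvGet tok1 (if tag_key == "xpos" then "upos" else "xpos") "_" else p
    let pos2 :=
      let p := pvGet tok2 tag_key "_"
      if p == "_" then pvGet tok2 (if tag_key == "xpos" then "upos" else "xpos") "_" else p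
    let is_adj1 := PySem.Str.startswith pos1 "A" || (tag_key == "upos" && pos1 == "ADJ")
    let is_noun2 := PySem.Str.startswith pos2 "N" || (tag_key == "upos" && (pos2 == "NOUN" || pos2 == "PROPN"))
    let is_noun1 := PySem.Str.startswith pos1 "N" || (tag_key == "upos" && (pos1 == "NOUN" || pos1 == "PROPN"))
    let is_adj2 := PySem.Str.startswith pos2 "A" || (tag_key == "upos" && pos2 == "ADJ")
    let c1 := if is_adj1 && is_noun2 then (c.1 + 1, c.2) else c
    if is_noun1 && is_adj2 then (c1.1, c1.2 + 1) else c1) ((0 : Int), (0 : Int))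
  (if counts.2 > counts.1 then PySem.Dict.insert preferences "adj_noun_order" "after"
   else if counts.1 > counts.2 then PySem.Dict.insert preferences "adj_noun_order" "before"
   else PySem.Dict.insert preferences "adj_noun_order" "either").items

-- ===== PORT B =====
-- per-token category character: 'A' adjective, 'N' noun, 'O' other
def pvCat (tag_key fallback : String) (tok : List (String × String)) : Char :=
  let pos :=
    let p := pvGet tok tag_key "_"
    if p == "_" then pvGet tok fallback "_" else p
  if PySem.Str.startswith pos "A" || (tag_key == "upos" && pos == "ADJ") then 'A'
  else if PySem.Str.startswith pos "N" || (tag_key == "upos" && (pos == "NOUN" || pos == "PROPN")) then 'N'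
  else 'O'

def learn_attachment_preferences_py_alt (sentence : List (List (String × String))) (vocab : List (String × String)) (tag_key : String) : List (String × String) :=
  let fallback := if tag_key == "xpos" then "upos" else "xpos"
  let cats : String := String.ofList (sentence.map (pvCat tag_key fallback))
  let before := PySem.Str.count cats "AN"
  let after := PySem.Str.count cats "NA"
  let order := if after > before then "after"
               else if before > after then "before"
               else "either"
  [("adj_noun_order", order)]

-- ===== PRECONDITION & SPEC =====
def Spec_learn_attachment_preferences_py (sentence : List (List (String × String))) (vocab : List (String × String)) (tag_key : String) (out : List (String × String)) : Prop := out = learn_attachment_preferences_py_alt sentence vocab tag_key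
instance (sentence : List (List (String × String))) (vocab : List (String × String)) (tag_key : String) (out : List (String × String)) : Decidable (Spec_learn_attachment_preferences_py sentence vocab tag_key out) := by unfold Spec_learn_attachment_preferences_py; infer_instance

-- ===== CLAIM (what is proved, stated in full; the proofs are below) =====
def Claim_equal_learn_attachment_preferences_py : Prop := ∀ (sentence : List (List (String × String))) (vocab : List (String × String)) (tag_key : String), Dom_learn_attachment_preferences_py sentence vocab tag_key → Spec_learn_attachment_preferences_py sentence vocab tag_key (learn_attachment_preferences_py sentence vocab tag_key)

-- ===== LEMMAS AND PROOFS =====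

-- proof-only abbreviations for the shared predicates of both ports
def pvIsAdj (tk pos : String) : Bool :=
  PySem.Str.startswith pos "A" || (tk == "upos" && pos == "ADJ")

def pvIsNoun (tk pos : String) : Bool :=
  PySem.Str.startswith pos "N" || (tk == "upos" && (pos == "NOUN" || pos == "PROPN"))

-- the normalized pos string of a token (shared shape of both ports)
def pvPos (tag_key : String) (tok : List (String × String)) : String :=
  let p := pvGet tok tag_key "_"
  if p == "_" then pvGet tok (if tag_key == "xpos" then "upos" else "xpos") "_" else p

-- one iteration of A's counting loop
def pvStep (tk : String) (tok1 tok2 : List (String × String)) (c : Int × Int) : Int × Int :=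
  let c1 := if pvIsAdj tk (pvPos tk tok1) && pvIsNoun tk (pvPos tk tok2) then (c.1 + 1, c.2) else c
  if pvIsNoun tk (pvPos tk tok1) && pvIsAdj tk (pvPos tk tok2) then (c1.1, c1.2 + 1) else c1

-- A's whole counting loop
def pvCountsA (tk : String) (sentence : List (List (String × String))) : Int × Int :=
  (List.range (sentence.length - 1)).foldl
    (fun c i => pvStep tk (sentence.getD i []) (sentence.getD (i + 1) []) c) ((0 : Int), (0 : Int))

theorem adj_noun_excl (tk pos : String) (ha : pvIsAdj tk pos = true) :
    pvIsNoun tk pos = false := by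
  have hA : PySem.Str.startswith pos "A" = true := by
    rcases Bool.or_eq_true_iff.mp ha with h | h
    · exact h
    · have : pos = "ADJ" := eq_of_beq ((Bool.and_eq_true _ _).mp h).2
      rw [this]; decide
  have hhead : ∃ t, pos.toList = 'A' :: t := by
    have : "A".toList <+: pos.toList := by
      have := PySem.Chars.startswith_iff (s := pos.toList) (p := "A".toList)
      simp only [PySem.Str.startswith_eq] at hA
      exact this.mp hA
    rcases this with ⟨s, hs⟩
    exact ⟨s, by simpa using hs.symm⟩
  rcases hhead with ⟨t, ht⟩
  unfold pvIsNoun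
  apply Bool.or_eq_false_iff.mpr
  refine ⟨?_, ?_⟩
  · cases h : PySem.Str.startswith pos "N" with
    | false => rfl
    | true =>
      exfalso
      have : "N".toList <+: pos.toList := by
        have := PySem.Chars.startswith_iff (s := pos.toList) (p := "N".toList)
        simp only [PySem.Str.startswith_eq] at h
        exact this.mp h
      rcases this with ⟨s, hs⟩
      rw [ht] at hs
      simp at hs
  · apply Bool.and_eq_false_iff.mpr
    right
    apply Bool.or_eq_false_iff.mpr
    refine ⟨?_, ?_⟩
    · cases h : (pos == "NOUN") with
      | false => rfl
      | true =>
        exfalso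
        have := eq_of_beq h
        rw [this] at ht
        simp at ht
    · cases h : (pos == "PROPN") with
      | false => rfl
      | true =>
        exfalso
        have := eq_of_beq h
        rw [this] at ht
        simp at ht

theorem pvCat_def (tk : String) (tok : List (String × String)) :
    pvCat tk (if tk == "xpos" then "upos" else "xpos") tok
      = (if pvIsAdj tk (pvPos tk tok) then 'A' else if pvIsNoun tk (pvPos tk tok) then 'N' else 'O') := rfl

theorem pvCat_eq_A_iff (tk : String) (tok : List (String × String)) :
    pvCat tk (if tk == "xpos" then "upos" else "xpos") tok = 'A' ↔ pvIsAdj tk (pvPos tk tok) = true := by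
  rw [pvCat_def]
  by_cases hA : pvIsAdj tk (pvPos tk tok) = true <;>
    by_cases hN : pvIsNoun tk (pvPos tk tok) = true <;> simp_all

theorem pvCat_eq_N_iff (tk : String) (tok : List (String × String)) :
    pvCat tk (if tk == "xpos" then "upos" else "xpos") tok = 'N' ↔ pvIsNoun tk (pvPos tk tok) = true := by
  rw [pvCat_def]
  by_cases hA : pvIsAdj tk (pvPos tk tok) = true <;>
    by_cases hN : pvIsNoun tk (pvPos tk tok) = true <;>
    simp_all [adj_noun_excl tk (pvPos tk tok)]

theorem pvStep_eq (tk : String) (x y : List (String × String)) (c : Int × Int) :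
    pvStep tk x y c
      = (c.1 + (if pvIsAdj tk (pvPos tk x) && pvIsNoun tk (pvPos tk y) then 1 else 0),
         c.2 + (if pvIsNoun tk (pvPos tk x) && pvIsAdj tk (pvPos tk y) then 1 else 0)) := by
  unfold pvStep
  split_ifs <;> simp

theorem cond_before (tk : String) (x y : List (String × String)) :
    (pvIsAdj tk (pvPos tk x) && pvIsNoun tk (pvPos tk y))
      = decide (pvCat tk (if tk == "xpos" then "upos" else "xpos") x = 'A'
          ∧ pvCat tk (if tk == "xpos" then "upos" else "xpos") y = 'N') := by
  rw [Bool.eq_iff_iff]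
  simp only [Bool.and_eq_true, decide_eq_true_eq]
  rw [pvCat_eq_A_iff, pvCat_eq_N_iff]

theorem cond_after (tk : String) (x y : List (String × String)) :
    (pvIsNoun tk (pvPos tk x) && pvIsAdj tk (pvPos tk y))
      = decide (pvCat tk (if tk == "xpos" then "upos" else "xpos") x = 'N'
          ∧ pvCat tk (if tk == "xpos" then "upos" else "xpos") y = 'A') := by
  rw [Bool.eq_iff_iff]
  simp only [Bool.and_eq_true, decide_eq_true_eq]
  rw [pvCat_eq_N_iff, pvCat_eq_A_iff]

def pairCnt (a b : Char) : List Char → Nat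
  | x :: y :: t => (if x = a ∧ y = b then 1 else 0) + pairCnt a b (y :: t)
  | _ => 0

-- A's index loop over range(len l - 1) with in-range getD accesses equals
-- the structural fold over adjacent pairs (l.zip l.tail).
theorem foldl_range_adjacent {α σ : Type} (g : α → α → σ → σ) (d : α) :
    ∀ (l : List α) (acc : σ),
      (List.range (l.length - 1)).foldl (fun c i => g (l.getD i d) (l.getD (i + 1) d) c) acc
        = (l.zip l.tail).foldl (fun c p => g p.1 p.2 c) acc := by
  intro l
  induction l with
  | nil => intro acc; simp
  | cons x t ih =>
    intro acc
    cases t with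
    | nil => simp
    | cons y u =>
      have hlen : (x :: y :: u : List α).length - 1 = ((y :: u : List α).length - 1) + 1 := by
        simp
      rw [hlen, List.range_succ_eq_map]
      simp only [List.foldl_cons, List.foldl_map]
      have hbody :
          (fun (c : σ) (i : ℕ) =>
              g ((x :: y :: u).getD (i + 1) d) ((x :: y :: u).getD (i + 1 + 1) d) c)
            = fun c i => g ((y :: u).getD i d) ((y :: u).getD (i + 1) d) c := by
        funext c i
        simp
      rw [hbody,
          show (x :: y :: u).getD 0 d = x from rfl,
          show (x :: y :: u).getD (0 + 1) d = y from rfl, ih]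
      simp

theorem pairFold_eq_pairCnt (tk : String) :
    ∀ (l : List (List (String × String))) (i j : Int),
      (l.zip l.tail).foldl (fun (c : Int × Int) p => pvStep tk p.1 p.2 c) (i, j)
      = (i + (pairCnt 'A' 'N' (l.map (pvCat tk (if tk == "xpos" then "upos" else "xpos"))) : Int),
         j + (pairCnt 'N' 'A' (l.map (pvCat tk (if tk == "xpos" then "upos" else "xpos"))) : Int)) := by
  intro l
  induction l with
  | nil => intro i j; simp [pairCnt]
  | cons x t ih =>
    intro i j
    cases t with
    | nil => simp [pairCnt]
    | cons y u =>
      simp only [List.tail_cons, List.zip_cons_cons, List.foldl_cons, List.map_cons]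
      simp only [List.tail_cons] at ih
      rw [pvStep_eq, ih]
      have hAN : ∀ (c1 c2 : Char) (r : List Char), pairCnt 'A' 'N' (c1 :: c2 :: r)
          = (if c1 = 'A' ∧ c2 = 'N' then 1 else 0) + pairCnt 'A' 'N' (c2 :: r) := fun _ _ _ => rfl
      have hNA : ∀ (c1 c2 : Char) (r : List Char), pairCnt 'N' 'A' (c1 :: c2 :: r)
          = (if c1 = 'N' ∧ c2 = 'A' then 1 else 0) + pairCnt 'N' 'A' (c2 :: r) := fun _ _ _ => rfl
      rw [hAN, hNA, cond_before, cond_after]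
      simp
      constructor <;> push_cast <;> ring

theorem pairCnt_cons_of_ne_head {a b x : Char} (h : x ≠ a) (t : List Char) :
    pairCnt a b (x :: t) = pairCnt a b t := by
  cases t with
  | nil => rfl
  | cons y u => simp [pairCnt, h]

-- Chars.count.go for a two-character pattern with distinct characters counts adjacent pairs
theorem countGo_pairCnt {a b : Char} (hab : a ≠ b) :
    ∀ (fuel : Nat) (l : List Char) (acc : Nat), l.length ≤ fuel →
      PySem.Chars.count.go [a, b] fuel l acc = acc + pairCnt a b l := by
  intro fuel
  induction fuel with
  | zero =>
    intro l acc hl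
    cases l with
    | nil => rfl
    | cons x t => simp at hl
  | succ n ih =>
    intro l acc hl
    cases l with
    | nil => rfl
    | cons x t =>
      cases t with
      | nil =>
        have : [a, b].isPrefixOf [x] = false := by
          cases hax : (a == x) <;> simp [List.isPrefixOf, hax]
        simp [PySem.Chars.count.go, this, pairCnt]
        cases n <;> rfl
      | cons y u =>
        by_cases hm : x = a ∧ y = b
        · have hpre : [a, b].isPrefixOf (x :: y :: u) = true := by
            simp [List.isPrefixOf, hm.1, hm.2]
          have hb : b ≠ a := fun h => hab h.symm
          have := ih u (acc + 1) (by simp at hl ⊢; omega)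
          simp only [PySem.Chars.count.go, hpre, if_true]
          simp only [List.length_cons, List.drop_succ_cons, List.length_nil, List.drop_zero]
          rw [this]
          simp [pairCnt, hm.1, hm.2, pairCnt_cons_of_ne_head hb]
          omega
        · have hpre : [a, b].isPrefixOf (x :: y :: u) = false := by
            by_contra hc
            have : [a, b] <+: (x :: y :: u) := by
              rw [← List.isPrefixOf_iff_prefix]
              simpa using hc
            rcases this with ⟨s, hs⟩
            simp at hs
            exact hm ⟨hs.1.symm, hs.2.1.symm⟩
          have := ih (y :: u) acc (by simp at hl ⊢; omega)
          simp only [PySem.Chars.count.go, hpre, if_false]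
          rw [this]
          simp [pairCnt, hm]

-- counting a distinct two-character substring is counting adjacent pairs
theorem strCount_eq_pairCnt {a b : Char} (hab : a ≠ b) (l : List Char) :
    PySem.Str.count (String.ofList l) (String.ofList [a, b]) = pairCnt a b l := by
  simp only [PySem.Str.count_eq, String.toList_ofList]
  unfold PySem.Chars.count
  simp only [List.isEmpty_cons, if_false]
  rw [countGo_pairCnt hab _ _ _ (le_refl _)]
  simp

theorem countsA_eq (tk : String) (sentence : List (List (String × String))) :
    pvCountsA tk sentence
      = ((pairCnt 'A' 'N' (sentence.map (pvCat tk (if tk == "xpos" then "upos" else "xpos"))) : Int),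
         (pairCnt 'N' 'A' (sentence.map (pvCat tk (if tk == "xpos" then "upos" else "xpos"))) : Int)) := by
  unfold pvCountsA
  rw [foldl_range_adjacent (pvStep tk) [] sentence, pairFold_eq_pairCnt tk sentence 0 0]
  simp

-- ===== VERDICT (by name: the statement is the Claim_ definition above) =====
theorem learn_attachment_preferences_py_spec : Claim_equal_learn_attachment_preferences_py := by
  intro sentence vocab tag_key _
  unfold Spec_learn_attachment_preferences_py
  show learn_attachment_preferences_py sentence vocab tag_key
      = learn_attachment_preferences_py_alt sentence vocab tag_key
  show (if (pvCountsA tag_key sentence).2 > (pvCountsA tag_key sentence).1 then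
          (PySem.Dict.empty : PySem.Dict String String).insert "adj_noun_order" "after"
        else if (pvCountsA tag_key sentence).1 > (pvCountsA tag_key sentence).2 then
          (PySem.Dict.empty : PySem.Dict String String).insert "adj_noun_order" "before"
        else (PySem.Dict.empty : PySem.Dict String String).insert "adj_noun_order" "either").items
      = [("adj_noun_order",
          if PySem.Str.count (String.ofList (sentence.map (pvCat tag_key (if tag_key == "xpos" then "upos" else "xpos")))) "NA"
             > PySem.Str.count (String.ofList (sentence.map (pvCat tag_key (if tag_key == "xpos" then "upos" else "xpos")))) "AN"
          then "after"
          else if PySem.Str.count (String.ofList (sentence.map (pvCat tag_key (if tag_key == "xpos" then "upos" else "xpos")))) "AN"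
             > PySem.Str.count (String.ofList (sentence.map (pvCat tag_key (if tag_key == "xpos" then "upos" else "xpos")))) "NA"
          then "before" else "either")]
  rw [countsA_eq,
      show ("AN" : String) = String.ofList ['A', 'N'] from rfl,
      show ("NA" : String) = String.ofList ['N', 'A'] from rfl,
      strCount_eq_pairCnt (by decide) (sentence.map (pvCat tag_key (if tag_key == "xpos" then "upos" else "xpos"))),
      strCount_eq_pairCnt (by decide) (sentence.map (pvCat tag_key (if tag_key == "xpos" then "upos" else "xpos")))]
  split_ifs with h1 h2 h3 h4 h5 <;> first
    | rfl
    | (exfalso; omega)
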